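-- pv_equiv track=rewrite | github.com/ksumini/Algorithm-Study2.0 | Programmers/마법의 엘리베이터/sungho.py | solution
-- ===== SOURCE A (Python) =====
-- def solution(storey: int):
--     """
--     +1 -1 +10 -10 +100 -100 ... 으로 절댓값 10^c 형태인 정수로 움직이는데 해당 층에서 0층까지 가는데 움직이는 최소 횟수
--     :param storey: 층 수
--     :return: 움직이는 최소 횟수
--     """
--     answer = 0
--
--     # 합이 음수면 움직이지 않음
--     # 규칙이 존재함.
--     cnt = 0
--     while storey != 0:
--         if storey % 10 < 5: # 1의 자리가 5보다 작으면 그냥 -1로 내려오면 됨. 그래서 cnt에 1의 자리만큼 추가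
--             cnt += storey % 10
--             storey = storey // 10
--         elif storey % 10 > 5: # 1의 자리가 5보다 클 때 반대로 +1로 올라가면 됨. 그래서 cnt에 10 - 1의자리만큼 추가
--             cnt += (10 - storey % 10)
--             storey = storey // 10 + 1
--         else:  # storey%10 == 5: # 만약 끝의 자리가 5인 경우에는 바로 앞자리가 몇인지 확인해서
--             if (storey // 10) % 10 >= 5: # 앞자리가 5보다 크거나 같으면 +1로 올라가는게 이득임 (왜냐하면 앞자리가 6으로 변형됨)
--                 cnt += (10 - storey % 10)
--                 storey = storey // 10 + 1
--             else: # 그게 아니면 그냥 내려오면 됨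
--                 cnt += storey % 10
--                 storey = storey // 10
--     return cnt
-- ===== SOURCE B (Python) =====
-- def solution(storey: int):
--     def f(n):
--         if n < 10:
--             return min(n, 11 - n)
--         d = n % 10
--         return min(d + f(n // 10), (10 - d) + f(n // 10 + 1))
--     return f(abs(storey))
-- ===== Notes on version B (the rewrite author's own statement) =====
-- stated objective: simpler
-- what changed: Replaces the greedy digit loop with an explicit ==5 lookahead by a short min-based digit recursion on abs(storey): f(n)=min(n,11-n) for n<10, else min(d+f(n//10),(10-d)+f(n//10+1)); the lookahead disappears because the min is taken over both options.
import Mathlib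
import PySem

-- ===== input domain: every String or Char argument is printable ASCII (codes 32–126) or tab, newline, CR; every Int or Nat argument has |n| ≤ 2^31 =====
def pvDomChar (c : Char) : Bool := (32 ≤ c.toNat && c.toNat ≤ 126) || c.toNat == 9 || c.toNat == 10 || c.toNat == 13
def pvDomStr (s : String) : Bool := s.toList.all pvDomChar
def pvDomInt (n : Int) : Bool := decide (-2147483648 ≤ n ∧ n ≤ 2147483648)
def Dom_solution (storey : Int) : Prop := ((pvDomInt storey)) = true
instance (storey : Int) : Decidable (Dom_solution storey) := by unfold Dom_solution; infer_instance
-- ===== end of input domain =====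

-- B replaces A's greedy digit loop (with its ==5 lookahead) by a min-based digit recursion on abs(storey); objective: simpler.

-- bridge lemmas cited by the ports' decreasing_by (divisor 10 is positive, so Python // and % are ediv/emod)
lemma pv_mod10 (a : Int) : PySem.Int.mod a 10 = a % 10 := PySem.Int.mod_eq_emod_of_pos (by norm_num)
lemma pv_div10 (a : Int) : PySem.Int.floordiv a 10 = a / 10 := PySem.Int.floordiv_eq_ediv_of_pos (by norm_num)

-- ===== PORT A =====
def solutionGo (storey cnt : Int) : Int :=
  if storey = 0 then cnt
  else if PySem.Int.mod storey 10 < 5 then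
    solutionGo (PySem.Int.floordiv storey 10) (cnt + PySem.Int.mod storey 10)
  else if 5 < PySem.Int.mod storey 10 then
    solutionGo (PySem.Int.floordiv storey 10 + 1) (cnt + (10 - PySem.Int.mod storey 10))
  else if 5 ≤ PySem.Int.mod (PySem.Int.floordiv storey 10) 10 then
    solutionGo (PySem.Int.floordiv storey 10 + 1) (cnt + (10 - PySem.Int.mod storey 10))
  else
    solutionGo (PySem.Int.floordiv storey 10) (cnt + PySem.Int.mod storey 10)
termination_by storey.natAbs
decreasing_by all_goals (simp only [pv_mod10, pv_div10] at *; omega)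

def solution (storey : Int) : Int := solutionGo storey 0

-- ===== PORT B =====
def minmoves (n : Int) : Int :=
  if n < 10 then min n (11 - n)
  else
    min (PySem.Int.mod n 10 + minmoves (PySem.Int.floordiv n 10))
        ((10 - PySem.Int.mod n 10) + minmoves (PySem.Int.floordiv n 10 + 1))
termination_by n.toNat
decreasing_by all_goals (simp only [pv_div10] at *; omega)

def solution_alt (storey : Int) : Int := minmoves |storey|

-- ===== PRECONDITION & SPEC =====
def Spec_solution (storey : Int) (out : Int) : Prop := out = solution_alt storey
instance (storey : Int) (out : Int) : Decidable (Spec_solution storey out) := by unfold Spec_solution; infer_instance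

-- ===== CLAIM (what is proved, stated in full; the proofs are below) =====
def Claim_equal_solution : Prop := ∀ (storey : Int), Dom_solution storey → Spec_solution storey (solution storey)

-- ===== LEMMAS AND PROOFS =====

lemma minmoves_base (n : Int) (h : n < 10) : minmoves n = min n (11 - n) := by
  rw [minmoves.eq_def]; simp [h]

lemma minmoves_step (n : Int) (h : 1 ≤ n) :
    minmoves n = min (n % 10 + minmoves (n / 10)) ((10 - n % 10) + minmoves (n / 10 + 1)) := by
  by_cases h10 : n < 10
  · have h0 : n / 10 = 0 := by omega
    have h1 : n % 10 = n := by omega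
    rw [minmoves_base n h10, h0, h1]
    have b0 : minmoves 0 = 0 := by
      rw [minmoves_base 0 (by norm_num)]; norm_num
    have b1 : minmoves (0 + 1) = 1 := by
      rw [show (0:Int) + 1 = 1 from by norm_num, minmoves_base 1 (by norm_num)]; norm_num
    omega
  · rw [minmoves.eq_def]
    simp only [pv_mod10, pv_div10, if_neg h10]

lemma minmoves_adj : ∀ (k : Nat) (n : Int), n.toNat = k → 0 ≤ n →
    minmoves (n + 1) ≤ minmoves n + 1 ∧ minmoves n ≤ minmoves (n + 1) + 1 := by
  intro k
  induction k using Nat.strong_induction_on with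
  | _ k ih =>
    intro n hk hn
    by_cases h0 : n = 0
    · subst h0
      have b0 : minmoves 0 = 0 := by
        rw [minmoves_base 0 (by norm_num)]; norm_num
      have b1 : minmoves (0 + 1) = 1 := by
        rw [show (0:Int) + 1 = 1 from by norm_num, minmoves_base 1 (by norm_num)]; norm_num
      omega
    have h1 : 1 ≤ n := by omega
    rw [minmoves_step n h1, minmoves_step (n + 1) (by omega)]
    by_cases hd : n % 10 = 9
    · have e1 : (n + 1) / 10 = n / 10 + 1 := by omega
      have e2 : (n + 1) % 10 = 0 := by omega
      rw [e1, e2]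
      have i1 := ih (n / 10).toNat (by omega) (n / 10) rfl (by omega)
      have i2 := ih (n / 10 + 1).toNat (by omega) (n / 10 + 1) rfl (by omega)
      omega
    · have e1 : (n + 1) / 10 = n / 10 := by omega
      have e2 : (n + 1) % 10 = n % 10 + 1 := by omega
      rw [e1, e2]
      omega

lemma minmoves_mono (n : Int) (hn : 0 ≤ n) :
    (5 ≤ n % 10 → minmoves (n + 1) ≤ minmoves n) ∧
    (n % 10 < 5 → minmoves n ≤ minmoves (n + 1)) := by
  by_cases h0 : n = 0
  · subst h0
    have b0 : minmoves 0 = 0 := by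
      rw [minmoves_base 0 (by norm_num)]; norm_num
    have b1 : minmoves (0 + 1) = 1 := by
      rw [show (0:Int) + 1 = 1 from by norm_num, minmoves_base 1 (by norm_num)]; norm_num
    omega
  have h1 : 1 ≤ n := by omega
  rw [minmoves_step n h1, minmoves_step (n + 1) (by omega)]
  have i1 := minmoves_adj (n / 10).toNat (n / 10) rfl (by omega)
  by_cases hd : n % 10 = 9
  · have e1 : (n + 1) / 10 = n / 10 + 1 := by omega
    have e2 : (n + 1) % 10 = 0 := by omega
    rw [e1, e2]
    omega
  · have e1 : (n + 1) / 10 = n / 10 := by omega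
    have e2 : (n + 1) % 10 = n % 10 + 1 := by omega
    rw [e1, e2]
    omega

lemma solutionGo_eq : ∀ (k : Nat) (storey cnt : Int), storey.natAbs = k →
    solutionGo storey cnt = cnt + minmoves (storey.natAbs : Int) := by
  intro k
  induction k using Nat.strong_induction_on with
  | _ k ih =>
    intro storey cnt hk
    rw [solutionGo.eq_def]
    simp only [pv_mod10, pv_div10]
    by_cases h0 : storey = 0
    · subst h0
      rw [if_pos rfl]
      have : ((Int.natAbs 0 : Nat) : Int) = 0 := by omega
      rw [this, minmoves_base 0 (by norm_num)]
      omega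
    rw [if_neg h0]
    rcases lt_or_gt_of_ne h0 with hneg | hpos
    · -- storey < 0
      have hA : ((storey.natAbs : Nat) : Int) = -storey := by omega
      have hs := minmoves_step (-storey) (by omega)
      have i1 := minmoves_adj ((-storey) / 10).toNat ((-storey) / 10) rfl (by omega)
      have i2 := minmoves_mono ((-storey) / 10) (by omega)
      split_ifs with c1 c2 c3
      · by_cases he : storey % 10 = 0
        · have hq : (((storey / 10).natAbs : Nat) : Int) = (-storey) / 10 := by omega
          rw [ih (storey / 10).natAbs (by omega) _ _ rfl, hq, hA]
          omega
        · have hq : (((storey / 10).natAbs : Nat) : Int) = (-storey) / 10 + 1 := by omega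
          rw [ih (storey / 10).natAbs (by omega) _ _ rfl, hq, hA]
          omega
      · have hq : (((storey / 10 + 1).natAbs : Nat) : Int) = (-storey) / 10 := by omega
        rw [ih (storey / 10 + 1).natAbs (by omega) _ _ rfl, hq, hA]
        omega
      · have hq : (((storey / 10 + 1).natAbs : Nat) : Int) = (-storey) / 10 := by omega
        rw [ih (storey / 10 + 1).natAbs (by omega) _ _ rfl, hq, hA]
        have j := i2.2 (by omega)
        omega
      · have hq : (((storey / 10).natAbs : Nat) : Int) = (-storey) / 10 + 1 := by omega
        rw [ih (storey / 10).natAbs (by omega) _ _ rfl, hq, hA]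
        have j := i2.1 (by omega)
        omega
    · -- 0 < storey
      have hA : ((storey.natAbs : Nat) : Int) = storey := by omega
      have hs := minmoves_step storey (by omega)
      have i1 := minmoves_adj (storey / 10).toNat (storey / 10) rfl (by omega)
      have i2 := minmoves_mono (storey / 10) (by omega)
      split_ifs with c1 c2 c3
      · have hq : (((storey / 10).natAbs : Nat) : Int) = storey / 10 := by omega
        rw [ih (storey / 10).natAbs (by omega) _ _ rfl, hq, hA]
        omega
      · have hq : (((storey / 10 + 1).natAbs : Nat) : Int) = storey / 10 + 1 := by omega
        rw [ih (storey / 10 + 1).natAbs (by omega) _ _ rfl, hq, hA]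
        omega
      · have hq : (((storey / 10 + 1).natAbs : Nat) : Int) = storey / 10 + 1 := by omega
        rw [ih (storey / 10 + 1).natAbs (by omega) _ _ rfl, hq, hA]
        have j := i2.1 (by omega)
        omega
      · have hq : (((storey / 10).natAbs : Nat) : Int) = storey / 10 := by omega
        rw [ih (storey / 10).natAbs (by omega) _ _ rfl, hq, hA]
        have j := i2.2 (by omega)
        omega

-- ===== VERDICT (by name: the statement is the Claim_ definition above) =====
theorem solution_spec : Claim_equal_solution := by
  intro storey _
  show solution storey = solution_alt storey
  unfold solution solution_alt
  rw [solutionGo_eq storey.natAbs storey 0 rfl, Int.abs_eq_natAbs]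
  omega
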